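-- pv_equiv track=rewrite | github.com/nicobrave/rendiciones | main.py | classify_expense
-- ===== SOURCE A (Python) =====
-- def classify_expense(text):
--     text = text.lower()
--     keywords = {
--         'materiales': ['cemento', 'acero', 'arena', 'hormigón', 'ladrillo'],
--         'transporte': ['flete', 'camión', 'transporte', 'entrega'],
--         'mano de obra': ['albañil', 'electricista', 'obrero', 'mano de obra'],
--         'servicios': ['agua', 'luz', 'electricidad', 'internet', 'gas'],
--     }
--
--     for category, words in keywords.items():
--         for word in text.split():
--             if word in words:
--                 return category
--     return 'otros'
-- ===== SOURCE B (Python) =====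
-- _KEYWORDS = [
--     ('materiales', ['cemento', 'acero', 'arena', 'hormigón', 'ladrillo']),
--     ('transporte', ['flete', 'camión', 'transporte', 'entrega']),
--     ('mano de obra', ['albañil', 'electricista', 'obrero', 'mano de obra']),
--     ('servicios', ['agua', 'luz', 'electricidad', 'internet', 'gas']),
-- ]
-- _CATS = [cat for cat, _ in _KEYWORDS]
-- _WORD_PRIO = {}
-- for _i, (_cat, _words) in enumerate(_KEYWORDS):
--     for _w in _words:
--         _WORD_PRIO.setdefault(_w, _i)
--
-- def classify_expense(text):
--     best = None
--     for tok in text.lower().split():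
--         p = _WORD_PRIO.get(tok)
--         if p is not None and (best is None or p < best):
--             best = p
--     return 'otros' if best is None else _CATS[best]
-- ===== Notes on version B (the rewrite author's own statement) =====
-- stated objective: alternative
-- what changed: Replaced the nested category-by-category scan over the token list with a precomputed word-to-priority dictionary and a single pass over the tokens maintaining the minimal matched priority.
import Mathlib
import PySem

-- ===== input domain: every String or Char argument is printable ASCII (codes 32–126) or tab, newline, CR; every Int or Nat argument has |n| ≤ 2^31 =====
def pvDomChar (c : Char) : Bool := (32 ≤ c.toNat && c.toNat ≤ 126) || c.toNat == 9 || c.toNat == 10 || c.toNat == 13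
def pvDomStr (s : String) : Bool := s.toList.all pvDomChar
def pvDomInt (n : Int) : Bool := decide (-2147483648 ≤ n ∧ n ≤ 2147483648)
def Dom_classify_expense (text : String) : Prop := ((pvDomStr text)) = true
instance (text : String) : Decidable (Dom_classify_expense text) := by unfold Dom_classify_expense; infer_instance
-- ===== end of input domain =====

-- B replaces A's nested category×token scan by a precomputed word→priority dictionary and a
-- single pass over the tokens keeping the minimal matched priority (objective: alternative).

-- ===== PORT A =====
def pvKeywordsA : List (String × List String) :=
  [("materiales", ["cemento", "acero", "arena", "hormigón", "ladrillo"]),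
   ("transporte", ["flete", "camión", "transporte", "entrega"]),
   ("mano de obra", ["albañil", "electricista", "obrero", "mano de obra"]),
   ("servicios", ["agua", "luz", "electricidad", "internet", "gas"])]

-- "for word in text.split(): if word in words: return category" (the inner loop, returning whether it fires)
def pvInner (ws : List String) : List String → Bool
  | [] => false
  | t :: ts => if ws.contains t then true else pvInner ws ts

-- "for category, words in keywords.items(): … return 'otros'"
def pvOuter (t : String) : List (String × List String) → String
  | [] => "otros"
  | (cat, ws) :: rest => if pvInner ws (PySem.Str.split₀ t) then cat else pvOuter t rest

def classify_expense (text : String) : String :=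
  let t := PySem.Str.lower text
  pvOuter t pvKeywordsA

-- ===== PORT B =====
def pvKeywordsB : List (String × List String) :=
  [("materiales", ["cemento", "acero", "arena", "hormigón", "ladrillo"]),
   ("transporte", ["flete", "camión", "transporte", "entrega"]),
   ("mano de obra", ["albañil", "electricista", "obrero", "mano de obra"]),
   ("servicios", ["agua", "luz", "electricidad", "internet", "gas"])]

def pvCats : List String := pvKeywordsB.map (·.1)

-- the word → priority dict, built once (Source B's setdefault loop over enumerate(_KEYWORDS))
def pvWordPrio : PySem.Dict String Nat :=
  pvKeywordsB.zipIdx.foldl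
    (fun d ci => ci.1.2.foldl (fun d w => d.setdefault w ci.2) d)
    PySem.Dict.empty

-- loop body: keep the smallest priority seen so far
def pvStep (best : Option Nat) (tok : String) : Option Nat :=
  match pvWordPrio.get? tok with
  | none => best
  | some p =>
    match best with
    | none => some p
    | some b => if p < b then some p else best

def classify_expense_alt (text : String) : String :=
  let best := (PySem.Str.split₀ (PySem.Str.lower text)).foldl pvStep none
  match best with
  | none => "otros"
  | some i => pvCats.getD i "otros"

-- ===== PRECONDITION & SPEC =====
def Spec_classify_expense (text : String) (out : String) : Prop := out = classify_expense_alt text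
instance (text : String) (out : String) : Decidable (Spec_classify_expense text out) := by unfold Spec_classify_expense; infer_instance

-- ===== CLAIM (what is proved, stated in full; the proofs are below) =====
def Claim_equal_classify_expense : Prop := ∀ (text : String), Dom_classify_expense text → Spec_classify_expense text (classify_expense text)

-- ===== LEMMAS AND PROOFS =====

-- minimum on Option Nat (none = no match yet)
def pvOptMin : Option Nat → Option Nat → Option Nat
  | none, y => y
  | some b, none => some b
  | some b, some p => if p < b then some p else some b

lemma pvOptMin_none_right (a : Option Nat) : pvOptMin a none = a := by
  cases a <;> rfl

lemma pvStep_eq (b : Option Nat) (t : String) :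
    pvStep b t = pvOptMin b (pvWordPrio.get? t) := by
  unfold pvStep
  cases pvWordPrio.get? t with
  | none => exact (pvOptMin_none_right b).symm
  | some p => cases b <;> rfl

lemma pvOptMin_assoc (a b c : Option Nat) :
    pvOptMin (pvOptMin a b) c = pvOptMin a (pvOptMin b c) := by
  rcases a with _ | a
  · rfl
  rcases b with _ | b
  · rfl
  rcases c with _ | c
  · rw [pvOptMin_none_right, pvOptMin_none_right]
  simp only [pvOptMin]
  split_ifs <;> dsimp only <;> split_ifs <;> first | rfl | omega

lemma pvFoldl_step (toks : List String) (acc : Option Nat) :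
    toks.foldl pvStep acc = pvOptMin acc (toks.foldl pvStep none) := by
  induction toks generalizing acc with
  | nil => simp [List.foldl, pvOptMin_none_right]
  | cons t ts ih =>
    simp only [List.foldl]
    rw [ih (pvStep acc t), ih (pvStep none t), pvStep_eq, pvStep_eq,
      pvOptMin_assoc]
    rfl

-- lookup in the built dict = the category-membership chain, in table order
lemma pvLookup_eq (t : String) :
    pvWordPrio.get? t =
      (if (["cemento", "acero", "arena", "hormigón", "ladrillo"].contains t) then some 0
       else if (["flete", "camión", "transporte", "entrega"].contains t) then some 1
       else if (["albañil", "electricista", "obrero", "mano de obra"].contains t) then some 2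
       else if (["agua", "luz", "electricidad", "internet", "gas"].contains t) then some 3
       else none) := by
  have h : pvWordPrio = PySem.Dict.mk
      [("cemento", 0), ("acero", 0), ("arena", 0), ("hormigón", 0), ("ladrillo", 0),
       ("flete", 1), ("camión", 1), ("transporte", 1), ("entrega", 1),
       ("albañil", 2), ("electricista", 2), ("obrero", 2), ("mano de obra", 2),
       ("agua", 3), ("luz", 3), ("electricidad", 3), ("internet", 3), ("gas", 3)] := by rfl
  rw [h]
  by_cases h1 : t = "cemento"
  · subst h1; decide
  by_cases h2 : t = "acero"
  · subst h2; decide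
  by_cases h3 : t = "arena"
  · subst h3; decide
  by_cases h4 : t = "hormigón"
  · subst h4; decide
  by_cases h5 : t = "ladrillo"
  · subst h5; decide
  by_cases h6 : t = "flete"
  · subst h6; decide
  by_cases h7 : t = "camión"
  · subst h7; decide
  by_cases h8 : t = "transporte"
  · subst h8; decide
  by_cases h9 : t = "entrega"
  · subst h9; decide
  by_cases h10 : t = "albañil"
  · subst h10; decide
  by_cases h11 : t = "electricista"
  · subst h11; decide
  by_cases h12 : t = "obrero"
  · subst h12; decide
  by_cases h13 : t = "mano de obra"
  · subst h13; decide
  by_cases h14 : t = "agua"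
  · subst h14; decide
  by_cases h15 : t = "luz"
  · subst h15; decide
  by_cases h16 : t = "electricidad"
  · subst h16; decide
  by_cases h17 : t = "internet"
  · subst h17; decide
  by_cases h18 : t = "gas"
  · subst h18; decide
  simp [beq_iff_eq, h1, Ne.symm h1, h2, Ne.symm h2, h3, Ne.symm h3, h4, Ne.symm h4, h5, Ne.symm h5, h6, Ne.symm h6, h7, Ne.symm h7, h8, Ne.symm h8, h9, Ne.symm h9, h10, Ne.symm h10, h11, Ne.symm h11, h12, Ne.symm h12, h13, Ne.symm h13, h14, Ne.symm h14, h15, Ne.symm h15, h16, Ne.symm h16, h17, Ne.symm h17, h18, Ne.symm h18, PySem.Dict.get?]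

-- the running-minimum fold computes the first-matching-category chain
lemma pvFold_chain (toks : List String) :
    toks.foldl pvStep none =
      (if toks.any (fun x => ["cemento", "acero", "arena", "hormigón", "ladrillo"].contains x) then some 0
       else if toks.any (fun x => ["flete", "camión", "transporte", "entrega"].contains x) then some 1
       else if toks.any (fun x => ["albañil", "electricista", "obrero", "mano de obra"].contains x) then some 2
       else if toks.any (fun x => ["agua", "luz", "electricidad", "internet", "gas"].contains x) then some 3
       else none) := by
  induction toks with
  | nil => simp
  | cons t ts ih =>
    have : (t :: ts).foldl pvStep none = pvOptMin (pvWordPrio.get? t) (ts.foldl pvStep none) := by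
      simp only [List.foldl]
      rw [pvFoldl_step, pvStep_eq]
      rfl
    rw [this, ih, pvLookup_eq t]
    simp only [List.any_cons]
    rcases Bool.eq_false_or_eq_true (["cemento", "acero", "arena", "hormigón", "ladrillo"].contains t) with c1 | c1 <;>
    rcases Bool.eq_false_or_eq_true (["flete", "camión", "transporte", "entrega"].contains t) with c2 | c2 <;>
    rcases Bool.eq_false_or_eq_true (["albañil", "electricista", "obrero", "mano de obra"].contains t) with c3 | c3 <;>
    rcases Bool.eq_false_or_eq_true (["agua", "luz", "electricidad", "internet", "gas"].contains t) with c4 | c4 <;>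
    rcases Bool.eq_false_or_eq_true (ts.any fun x => ["cemento", "acero", "arena", "hormigón", "ladrillo"].contains x) with a1 | a1 <;>
    rcases Bool.eq_false_or_eq_true (ts.any fun x => ["flete", "camión", "transporte", "entrega"].contains x) with a2 | a2 <;>
    rcases Bool.eq_false_or_eq_true (ts.any fun x => ["albañil", "electricista", "obrero", "mano de obra"].contains x) with a3 | a3 <;>
    rcases Bool.eq_false_or_eq_true (ts.any fun x => ["agua", "luz", "electricidad", "internet", "gas"].contains x) with a4 | a4 <;>
    simp only [c1, c2, c3, c4, a1, a2, a3, a4] <;> rfl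

lemma pvInner_any (ws : List String) (toks : List String) :
    pvInner ws toks = toks.any (fun x => ws.contains x) := by
  induction toks with
  | nil => rfl
  | cons t ts ih =>
    simp only [pvInner, List.any_cons]
    rcases Bool.eq_false_or_eq_true (ws.contains t) with h | h
    · simp only [h, ih]
      simp
    · simp only [h, ih]
      simp

-- ===== VERDICT (by name: the statement is the Claim_ definition above) =====
theorem classify_expense_spec : Claim_equal_classify_expense := by
  intro text _
  unfold Spec_classify_expense classify_expense classify_expense_alt
  simp only [pvKeywordsA, pvOuter, pvInner_any, pvFold_chain]
  rcases Bool.eq_false_or_eq_true ((PySem.Str.split₀ (PySem.Str.lower text)).any fun x => ["cemento", "acero", "arena", "hormigón", "ladrillo"].contains x) with a1 | a1 <;>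
  rcases Bool.eq_false_or_eq_true ((PySem.Str.split₀ (PySem.Str.lower text)).any fun x => ["flete", "camión", "transporte", "entrega"].contains x) with a2 | a2 <;>
  rcases Bool.eq_false_or_eq_true ((PySem.Str.split₀ (PySem.Str.lower text)).any fun x => ["albañil", "electricista", "obrero", "mano de obra"].contains x) with a3 | a3 <;>
  rcases Bool.eq_false_or_eq_true ((PySem.Str.split₀ (PySem.Str.lower text)).any fun x => ["agua", "luz", "electricidad", "internet", "gas"].contains x) with a4 | a4 <;>
  simp only [a1, a2, a3, a4] <;> rfl
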